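-- pv_equiv track=rewrite | github.com/ky8778/study_algorithm | Dongbinna/20_감시피하기.py | solution
-- ===== SOURCE A (Python) =====
-- from itertools import combinations
-- from copy import deepcopy
--
-- def check(myMap, y, x):
--     # return go, See
--     if myMap[y][x] == 'S':
--         return False, True
--     elif myMap[y][x] == 'O' or myMap[y][x] == 'T':
--         return False, False
--     else:
--         return True, False
--
-- def solution(inputMap, N):
--     myMap = deepcopy(inputMap)
--     teachers = []
--     blanks = []
--
--     # 선생님, 빈칸 list 만들기
--     for i in range(N):
--         for j in range(N):
--             if myMap[i][j] == 'T':
--                 teachers.append((i, j))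
--             elif myMap[i][j] == 'X':
--                 blanks.append((i, j))
--
--     # 빈칸 3개 뽑는 조합 만들기
--     combPick = list(combinations(blanks, 3))
--
--     for pick in combPick:
--         # 빈칸 3개에 장애물 만들기
--         for location in list(pick):
--             myMap[location[0]][location[1]] = 'O'
--
--         # 선생님들이 감시할때 학생이 검출되는지 확인
--         See = False
--         for t in teachers:
--             # 오른쪽
--             if not See:
--                 y, x = t[0], t[1]
--                 while x < N-1:
--                     x += 1
--                     go, See = check(myMap, y, x)
--                     if not go:
--                         break
--             # 왼쪽
--             if not See:
--                 y, x = t[0], t[1]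
--                 while x > 0:
--                     x -= 1
--                     go, See = check(myMap, y, x)
--                     if not go:
--                         break
--             # 위쪽
--             if not See:
--                 y, x = t[0], t[1]
--                 while y < N-1:
--                     y += 1
--                     go, See = check(myMap, y, x)
--                     if not go:
--                         break
--             # 아래쪽
--             if not See:
--                 y, x = t[0], t[1]
--                 while y > 0:
--                     y -= 1
--                     go, See = check(myMap, y, x)
--                     if not go:
--                         break
--             # 만약 학생을 봤다면 더 확인할 필요 없음
--             if See:
--                 break
--
--         # 다 확인했는데 학생을 못봤으면 정답
--         if not See:
--             return 'YES'
--
--         # 장애물 다시 치우기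
--         for location in list(pick):
--             myMap[location[0]][location[1]] = 'X'
--
--     return 'NO'
-- ===== SOURCE B (Python) =====
-- from itertools import combinations
--
-- def solution(inputMap, N):
--     # Precompute, per teacher and direction, the threatened sightline's blockable
--     # ('X') cells once; then test each 3-blank combination as a hitting set.
--     cells = [(i, j) for i in range(N) for j in range(N)]
--     teachers = [c for c in cells if inputMap[c[0]][c[1]] == 'T']
--     blanks = [c for c in cells if inputMap[c[0]][c[1]] == 'X']
--     segs = []
--     for (ty, tx) in teachers:
--         for (dy, dx) in ((0, 1), (0, -1), (1, 0), (-1, 0)):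
--             y, x = ty, tx
--             between = []
--             while (x < N - 1 if dx == 1 else x > 0 if dx == -1 else
--                    y < N - 1 if dy == 1 else y > 0):
--                 y += dy
--                 x += dx
--                 c = inputMap[y][x]
--                 if c == 'S':
--                     segs.append(frozenset(between))
--                     break
--                 if c == 'O' or c == 'T':
--                     break
--                 if c == 'X':
--                     between.append((y, x))
--     for pick in combinations(blanks, 3):
--         ps = frozenset(pick)
--         if all(s & ps for s in segs):
--             return 'YES'
--     return 'NO'
-- ===== Notes on version B (the rewrite author's own statement) =====
-- stated objective: faster
-- what changed: Instead of re-simulating every teacher's four sightlines on a mutated grid for each of the C(blanks,3) obstacle placements, B walks each teacher's sightlines once on the original grid to precompute the blockable ('X') cells of every threatened segment, and then tests each 3-blank combination as a hitting set over those precomputed segments with frozenset intersections.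
import Mathlib
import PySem

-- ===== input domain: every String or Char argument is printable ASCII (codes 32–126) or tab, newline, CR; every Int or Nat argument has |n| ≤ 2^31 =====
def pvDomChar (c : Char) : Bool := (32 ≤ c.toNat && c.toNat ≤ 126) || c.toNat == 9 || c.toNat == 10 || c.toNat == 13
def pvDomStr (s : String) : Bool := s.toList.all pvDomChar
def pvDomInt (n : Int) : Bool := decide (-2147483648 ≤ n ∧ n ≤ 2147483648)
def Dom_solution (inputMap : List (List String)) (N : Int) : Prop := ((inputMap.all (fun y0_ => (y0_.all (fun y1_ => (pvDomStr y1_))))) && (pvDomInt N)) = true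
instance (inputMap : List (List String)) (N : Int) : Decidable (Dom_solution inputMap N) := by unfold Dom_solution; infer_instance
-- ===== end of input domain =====

-- B precomputes each teacher's threatened sightline's blockable cells once and tests each
-- 3-blank combination as a hitting set, instead of re-simulating all sightlines per combination (faster).


-- ===== PORT A =====
-- shared helpers: Python's m[y][x] read/write (exact for the in-range indices Pre_solution
-- admits), the four while-loop guards, and itertools.combinations
def pvGet2 (m : List (List String)) (y x : Int) : String :=
  PySem.List.pyGetD (PySem.List.pyGetD m y []) x ""

def pvSet2 (m : List (List String)) (y x : Int) (v : String) : List (List String) :=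
  PySem.List.pySetD m y (PySem.List.pySetD (PySem.List.pyGetD m y []) x v)

-- the loop guard of A's four while loops (right / left / down / up), also B's
def pvCond (N y x dy dx : Int) : Bool :=
  if dx = 1 then decide (x < N - 1) else if dx = -1 then decide (0 < x)
  else if dy = 1 then decide (y < N - 1) else decide (0 < y)

-- itertools.combinations(l, k) in Python's order
def pvCombs {α : Type} : Nat → List α → List (List α)
  | 0, _ => [[]]
  | _+1, [] => []
  | k+1, a :: l => (pvCombs k l).map (a :: ·) ++ pvCombs (k+1) l

-- A's check(myMap, y, x) -> (go, See)
def pvCheck (m : List (List String)) (y x : Int) : Bool × Bool :=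
  let c := pvGet2 m y x
  if c = "S" then (false, true)
  else if c = "O" || c = "T" then (false, false)
  else (true, false)

-- one of A's while loops: step, check, break on not go; fuel N.toNat bounds the ≤ N-1 steps
def pvSeeDir (m : List (List String)) (N dy dx : Int) : Int → Int → Nat → Bool
  | _, _, 0 => false
  | y, x, fuel+1 =>
    if pvCond N y x dy dx then
      let gs := pvCheck m (y + dy) (x + dx)
      if gs.1 then pvSeeDir m N dy dx (y + dy) (x + dx) fuel else gs.2
    else false

-- A's per-teacher body: the four guarded direction scans (each entered only if not See)
def pvTeacherSee (m : List (List String)) (N : Int) (t : Int × Int) : Bool :=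
  if pvSeeDir m N 0 1 t.1 t.2 N.toNat then true
  else if pvSeeDir m N 0 (-1) t.1 t.2 N.toNat then true
  else if pvSeeDir m N 1 0 t.1 t.2 N.toNat then true
  else pvSeeDir m N (-1) 0 t.1 t.2 N.toNat

-- A's scan building (teachers, blanks) by appending
def pvScan (m : List (List String)) (N : Int) : List (Int × Int) × List (Int × Int) :=
  (PySem.List.pyRange 0 N 1).foldl (fun tb i =>
    (PySem.List.pyRange 0 N 1).foldl (fun tb j =>
      let c := pvGet2 m i j
      if c = "T" then (tb.1 ++ [(i, j)], tb.2)
      else if c = "X" then (tb.1, tb.2 ++ [(i, j)]) else tb) tb) ([], [])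

-- 'for location in pick: myMap[y][x] = v'
def pvPlace (m : List (List String)) (pick : List (Int × Int)) (v : String) : List (List String) :=
  pick.foldl (fun mm c => pvSet2 mm c.1 c.2 v) m

-- A's main loop over the combinations, mutating and restoring the map
def pvLoop (N : Int) (teachers : List (Int × Int)) : List (List (Int × Int)) → List (List String) → String
  | [], _ => "NO"
  | pick :: rest, m =>
    let m2 := pvPlace m pick "O"
    if teachers.any (pvTeacherSee m2 N) then pvLoop N teachers rest (pvPlace m2 pick "X")
    else "YES"

def solution (inputMap : List (List String)) (N : Int) : String :=
  let tb := pvScan inputMap N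
  pvLoop N tb.1 (pvCombs 3 tb.2) inputMap

-- ===== PORT B =====
-- [(i, j) for i in range(N) for j in range(N)]
def pvCells (N : Int) : List (Int × Int) :=
  (PySem.List.pyRange 0 N 1).flatMap (fun i => (PySem.List.pyRange 0 N 1).map (fun j => (i, j)))

-- B's sightline walk on the ORIGINAL map: some cells = the blockable 'X' cells strictly
-- between the teacher and the first student (a threatened segment); none = no threat
def pvCollect (m : List (List String)) (N dy dx : Int) : Int → Int → Nat → Option (List (Int × Int))
  | _, _, 0 => none
  | y, x, fuel+1 =>
    if pvCond N y x dy dx then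
      let c := pvGet2 m (y + dy) (x + dx)
      if c = "S" then some []
      else if c = "O" || c = "T" then none
      else if c = "X" then (pvCollect m N dy dx (y + dy) (x + dx) fuel).map ((y + dy, x + dx) :: ·)
      else pvCollect m N dy dx (y + dy) (x + dx) fuel
    else none

-- all threatened segments (Source B's segs list; frozensets ported as the lists of their elements)
def pvSegs (m : List (List String)) (N : Int) (teachers : List (Int × Int)) : List (List (Int × Int)) :=
  teachers.flatMap (fun t =>
    ([(0, 1), (0, -1), (1, 0), (-1, 0)] : List (Int × Int)).filterMap
      (fun d => pvCollect m N d.1 d.2 t.1 t.2 N.toNat))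

def solution_alt (inputMap : List (List String)) (N : Int) : String :=
  let teachers := (pvCells N).filter (fun c => pvGet2 inputMap c.1 c.2 = "T")
  let blanks := (pvCells N).filter (fun c => pvGet2 inputMap c.1 c.2 = "X")
  let segs := pvSegs inputMap N teachers
  -- 's & ps' (non-empty intersection) ported as s.any (· ∈ pick)
  if (pvCombs 3 blanks).any (fun pick => segs.all (fun s => s.any (fun c => pick.contains c)))
  then "YES" else "NO"

-- ===== PRECONDITION & SPEC =====
-- Pre_ excludes exactly the inputs on which Python A raises IndexError: a grid with fewer
-- than N rows, or one of the first N rows shorter than N.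
def Pre_solution (inputMap : List (List String)) (N : Int) : Prop :=
  N ≤ (inputMap.length : Int) ∧ ∀ r ∈ inputMap.take N.toNat, N ≤ (r.length : Int)
instance (inputMap : List (List String)) (N : Int) : Decidable (Pre_solution inputMap N) := by
  unfold Pre_solution; infer_instance

def pvWitness_solution : List (List String) × Int := ([["T", "X"], ["X", "S"]], 2)

def Spec_solution (inputMap : List (List String)) (N : Int) (out : String) : Prop := out = solution_alt inputMap N
instance (inputMap : List (List String)) (N : Int) (out : String) : Decidable (Spec_solution inputMap N out) := by unfold Spec_solution; infer_instance

-- ===== CLAIM (what is proved, stated in full; the proofs are below) =====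
def Claim_equal_solution : Prop := ∀ (inputMap : List (List String)) (N : Int), Dom_solution inputMap N → Pre_solution inputMap N → Spec_solution inputMap N (solution inputMap N)

-- ===== LEMMAS AND PROOFS =====

-- a cell usable as an obstacle: nonnegative, in range, and blank in m
def pvOk (m : List (List String)) (c : Int × Int) : Prop :=
  0 ≤ c.1 ∧ 0 ≤ c.2 ∧ c.1.toNat < m.length ∧ c.2.toNat < (m.getD c.1.toNat []).length ∧
    pvGet2 m c.1 c.2 = "X"

theorem pvGet2_nonneg (m : List (List String)) (y x : Int) (hy : 0 ≤ y) (hx : 0 ≤ x) :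
    pvGet2 m y x = (m.getD y.toNat []).getD x.toNat "" := by
  unfold pvGet2
  rw [PySem.List.pyGetD_of_nonneg m [] hy, PySem.List.pyGetD_of_nonneg _ "" hx]

theorem pvSet2_nonneg (m : List (List String)) (y x : Int) (v : String) (hy : 0 ≤ y) (hx : 0 ≤ x) :
    pvSet2 m y x v = m.set y.toNat ((m.getD y.toNat []).set x.toNat v) := by
  unfold pvSet2
  rw [PySem.List.pyGetD_of_nonneg m [] hy, PySem.List.pySetD_of_nonneg _ v hx,
    PySem.List.pySetD_of_nonneg m _ hy]

-- List.getD through List.set (tiny helpers specific to the row updates below)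
theorem pvGetD_set_self {α : Type} (l : List α) (i : Nat) (a : α) (h : i < l.length) (d : α) :
    (l.set i a).getD i d = a := by
  simp [List.getD, List.getElem?_set_self h]

theorem pvGetD_set_ne {α : Type} (l : List α) (i j : Nat) (a : α) (h : i ≠ j) (d : α) :
    (l.set i a).getD j d = l.getD j d := by
  simp [List.getD, List.getElem?_set_ne h]

-- reading an updated cell back (valid target)
theorem pvGet2_set2_same (m : List (List String)) (a b : Int) (v : String)
    (ha : 0 ≤ a) (hb : 0 ≤ b) (h1 : a.toNat < m.length) (h2 : b.toNat < (m.getD a.toNat []).length) :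
    pvGet2 (pvSet2 m a b v) a b = v := by
  rw [pvSet2_nonneg m a b v ha hb, pvGet2_nonneg _ a b ha hb,
    pvGetD_set_self _ _ _ h1, pvGetD_set_self _ _ _ h2]

-- reading any other cell (no bounds needed)
theorem pvGet2_set2_other (m : List (List String)) (a b y x : Int) (v : String)
    (ha : 0 ≤ a) (hb : 0 ≤ b) (hy : 0 ≤ y) (hx : 0 ≤ x) (hne : (y, x) ≠ (a, b)) :
    pvGet2 (pvSet2 m a b v) y x = pvGet2 m y x := by
  rw [pvSet2_nonneg m a b v ha hb, pvGet2_nonneg _ y x hy hx, pvGet2_nonneg m y x hy hx]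
  by_cases hyy : y = a
  · subst hyy
    have hxx : x ≠ b := fun h => hne (by simp [h])
    have hxt : x.toNat ≠ b.toNat := fun h => hxx (by omega)
    by_cases hrange : y.toNat < m.length
    · rw [pvGetD_set_self _ _ _ hrange, pvGetD_set_ne _ _ _ _ (Ne.symm hxt)]
    · rw [List.set_eq_of_length_le (by omega)]
  · have hyt : y.toNat ≠ a.toNat := fun h => hyy (by omega)
    rw [pvGetD_set_ne _ _ _ _ (Ne.symm hyt)]

-- shape preservation
theorem pvSet2_length (m : List (List String)) (a b : Int) (v : String) :
    (pvSet2 m a b v).length = m.length := by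
  unfold pvSet2
  rw [PySem.List.length_pySetD]

theorem pvSet2_row_length (m : List (List String)) (a b : Int) (v : String)
    (ha : 0 ≤ a) (hb : 0 ≤ b) (k : Nat) :
    ((pvSet2 m a b v).getD k []).length = (m.getD k []).length := by
  rw [pvSet2_nonneg m a b v ha hb]
  by_cases hk : k = a.toNat
  · by_cases hr : a.toNat < m.length
    · rw [hk, pvGetD_set_self _ _ _ hr]
      simp
    · rw [List.set_eq_of_length_le (by omega)]
  · rw [pvGetD_set_ne _ _ _ _ (Ne.symm hk)]

-- pvOk survives any pvSet2 with nonnegative target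
theorem pvOk_set2 (m : List (List String)) (a b : Int) (v : String) (c : Int × Int)
    (ha : 0 ≤ a) (hb : 0 ≤ b) (h : pvOk m c) :
    c.1.toNat < (pvSet2 m a b v).length ∧
      c.2.toNat < ((pvSet2 m a b v).getD c.1.toNat []).length := by
  obtain ⟨h1, h2, h3, h4, h5⟩ := h
  rw [pvSet2_length, pvSet2_row_length m a b v ha hb]
  exact ⟨h3, h4⟩

-- writing the same cell twice keeps only the second write
theorem pvSet2_collapse (m : List (List String)) (a b : Int) (v w : String)
    (ha : 0 ≤ a) (hb : 0 ≤ b) :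
    pvSet2 (pvSet2 m a b v) a b w = pvSet2 m a b w := by
  rw [pvSet2_nonneg m a b v ha hb, pvSet2_nonneg _ a b w ha hb, pvSet2_nonneg m a b w ha hb]
  by_cases hr : a.toNat < m.length
  · rw [pvGetD_set_self _ _ _ hr, List.set_set, List.set_set]
  · rw [List.set_eq_of_length_le (l := m) (by omega)]

-- writes to distinct cells commute
theorem pvSet2_comm (m : List (List String)) (a b y x : Int) (v w : String)
    (ha : 0 ≤ a) (hb : 0 ≤ b) (hy : 0 ≤ y) (hx : 0 ≤ x) (hne : (y, x) ≠ (a, b)) :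
    pvSet2 (pvSet2 m a b v) y x w = pvSet2 (pvSet2 m y x w) a b v := by
  rw [pvSet2_nonneg m a b v ha hb, pvSet2_nonneg _ y x w hy hx,
    pvSet2_nonneg m y x w hy hx, pvSet2_nonneg _ a b v ha hb]
  by_cases hyy : y = a
  · subst hyy
    have hxx : x ≠ b := fun h => hne (by simp [h])
    have hxt : x.toNat ≠ b.toNat := fun h => hxx (by omega)
    by_cases hr : y.toNat < m.length
    · rw [pvGetD_set_self _ _ _ hr, pvGetD_set_self _ _ _ hr, List.set_set, List.set_set,
        List.set_comm _ _ hxt]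
    · rw [List.set_eq_of_length_le (l := m) (by omega), List.set_eq_of_length_le (l := m) (by omega),
        List.set_eq_of_length_le (l := m) (by omega)]
  · have hyt : y.toNat ≠ a.toNat := fun h => hyy (by omega)
    rw [pvGetD_set_ne _ _ _ _ (Ne.symm hyt), pvGetD_set_ne _ _ _ _ hyt,
      List.set_comm _ _ (Ne.symm hyt)]

-- writing back the value already there is a no-op
theorem pvSet2_ident (m : List (List String)) (a b : Int)
    (ha : 0 ≤ a) (hb : 0 ≤ b) (h1 : a.toNat < m.length) (h2 : b.toNat < (m.getD a.toNat []).length) :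
    pvSet2 m a b (pvGet2 m a b) = m := by
  rw [pvGet2_nonneg m a b ha hb, pvSet2_nonneg m a b _ ha hb,
    List.getD_eq_getElem _ _ h2, List.set_getElem_self,
    List.getD_eq_getElem _ _ h1, List.set_getElem_self]

theorem pvOk_set2_other (m : List (List String)) (a b : Int) (v : String) (c : Int × Int)
    (ha : 0 ≤ a) (hb : 0 ≤ b) (h : pvOk m c) (hne : c ≠ (a, b)) :
    pvOk (pvSet2 m a b v) c := by
  obtain ⟨h1, h2, h3, h4, h5⟩ := h
  obtain ⟨h3', h4'⟩ := pvOk_set2 m a b v c ha hb ⟨h1, h2, h3, h4, h5⟩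
  refine ⟨h1, h2, h3', h4', ?_⟩
  rw [pvGet2_set2_other m a b c.1 c.2 v ha hb h1 h2 (by simpa using hne)]
  exact h5

-- a pvPlace pass writes exactly the picked cells
theorem pvGet2_place (pick : List (Int × Int)) (m : List (List String)) (v : String) (y x : Int)
    (hnd : pick.Nodup) (hp : ∀ c ∈ pick, pvOk m c) (hy : 0 ≤ y) (hx : 0 ≤ x) :
    pvGet2 (pvPlace m pick v) y x = if pick.contains (y, x) then v else pvGet2 m y x := by
  induction pick generalizing m with
  | nil => simp [pvPlace]
  | cons c0 p ih =>
    have hc0 := hp c0 (by simp)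
    have hstep : pvPlace m (c0 :: p) v = pvPlace (pvSet2 m c0.1 c0.2 v) p v := rfl
    rw [hstep, ih (pvSet2 m c0.1 c0.2 v) (by exact hnd.of_cons)
      (fun c hc => pvOk_set2_other m c0.1 c0.2 v c hc0.1 hc0.2.1 (hp c (by simp [hc]))
        (by rintro rfl; exact (List.nodup_cons.mp hnd).1 hc))]
    by_cases hmem : (y, x) ∈ p
    · simp [hmem]
    · by_cases heq : (y, x) = c0
      · subst heq
        rw [pvGet2_set2_same m (y, x).1 (y, x).2 v hc0.1 hc0.2.1 hc0.2.2.1 hc0.2.2.2.1]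
        simp [hmem]
      · rw [pvGet2_set2_other m c0.1 c0.2 y x v hc0.1 hc0.2.1 hy hx (by simpa using heq)]
        simp [hmem, heq]

-- a single write to a cell outside pick commutes past a pvPlace pass
theorem pvSet2_place_comm (pick : List (Int × Int)) (m : List (List String)) (v w : String)
    (a b : Int) (ha : 0 ≤ a) (hb : 0 ≤ b)
    (hp : ∀ c ∈ pick, 0 ≤ c.1 ∧ 0 ≤ c.2) (hnm : (a, b) ∉ pick) :
    pvSet2 (pvPlace m pick v) a b w = pvPlace (pvSet2 m a b w) pick v := by
  induction pick generalizing m with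
  | nil => rfl
  | cons c0 p ih =>
    have hc0 := hp c0 (by simp)
    have hstep : ∀ mm, pvPlace mm (c0 :: p) v = pvPlace (pvSet2 mm c0.1 c0.2 v) p v := fun _ => rfl
    rw [hstep, hstep, ih (pvSet2 m c0.1 c0.2 v) (fun c hc => hp c (by simp [hc]))
      (fun hmem => hnm (by simp [hmem])),
      pvSet2_comm _ c0.1 c0.2 a b v w hc0.1 hc0.2 ha hb
        (by intro h; exact hnm (by simp [Prod.ext_iff] at h; simp [h.1, h.2]))]

-- un-placing the obstacles restores the original map
theorem pvPlace_restore (pick : List (Int × Int)) (m : List (List String))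
    (hnd : pick.Nodup) (hp : ∀ c ∈ pick, pvOk m c) :
    pvPlace (pvPlace m pick "O") pick "X" = m := by
  induction pick generalizing m with
  | nil => rfl
  | cons c0 p ih =>
    have hc0 := hp c0 (by simp)
    have hstep : ∀ mm (u : String), pvPlace mm (c0 :: p) u = pvPlace (pvSet2 mm c0.1 c0.2 u) p u :=
      fun _ _ => rfl
    rw [hstep, hstep,
      pvSet2_place_comm p (pvSet2 m c0.1 c0.2 "O") "O" "X" c0.1 c0.2 hc0.1 hc0.2.1
        (fun c hc => ⟨(hp c (by simp [hc])).1, (hp c (by simp [hc])).2.1⟩)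
        (by simpa using (List.nodup_cons.mp hnd).1),
      pvSet2_collapse m c0.1 c0.2 "O" "X" hc0.1 hc0.2.1]
    have : pvSet2 m c0.1 c0.2 "X" = m := by
      have := pvSet2_ident m c0.1 c0.2 hc0.1 hc0.2.1 hc0.2.2.1 hc0.2.2.2.1
      rwa [hc0.2.2.2.2] at this
    rw [this]
    exact ih m hnd.of_cons (fun c hc => hp c (by simp [hc]))

-- THE CORE: A's sightline walk on the obstructed map sees a student iff B recorded a
-- threatened segment there and the pick misses all of its cells
theorem pvWalk (m : List (List String)) (N : Int) (pick : List (Int × Int))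
    (hnd : pick.Nodup) (hp : ∀ c ∈ pick, pvOk m c) (dy dx : Int)
    (hd : (dy, dx) = (0, 1) ∨ (dy, dx) = (0, -1) ∨ (dy, dx) = (1, 0) ∨ (dy, dx) = (-1, 0)) :
    ∀ (fuel : Nat) (y x : Int), 0 ≤ y → 0 ≤ x →
    pvSeeDir (pvPlace m pick "O") N dy dx y x fuel =
      (pvCollect m N dy dx y x fuel).elim false (fun s => s.all (fun c => !pick.contains c)) := by
  intro fuel
  induction fuel with
  | zero => intro y x hy hx; simp [pvSeeDir, pvCollect]
  | succ f ih =>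
    intro y x hy hx
    by_cases hcond : pvCond N y x dy dx
    · have hnn : 0 ≤ y + dy ∧ 0 ≤ x + dx := by
        rcases hd with h | h | h | h <;>
          (injection h with h1 h2; subst h1; subst h2; simp [pvCond] at hcond; omega)
      have hplace := pvGet2_place pick m "O" (y + dy) (x + dx) hnd hp hnn.1 hnn.2
      by_cases hin : (y + dy, x + dx) ∈ pick
      · have hO : pvGet2 (pvPlace m pick "O") (y + dy) (x + dx) = "O" := by
          rw [hplace]; simp [hin]
        have hX : pvGet2 m (y + dy) (x + dx) = "X" := (hp _ hin).2.2.2.2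
        simp only [pvSeeDir, pvCollect, hcond, if_true, pvCheck, hO, hX]
        norm_num
        cases hcol : pvCollect m N dy dx (y + dy) (x + dx) f with
        | none => simp
        | some cells => simp [hin]
      · have hsame : pvGet2 (pvPlace m pick "O") (y + dy) (x + dx) = pvGet2 m (y + dy) (x + dx) := by
          rw [hplace]; simp [hin]
        by_cases hS : pvGet2 m (y + dy) (x + dx) = "S"
        · simp [pvSeeDir, pvCollect, hcond, pvCheck, hsame, hS]
        · by_cases hOT : pvGet2 m (y + dy) (x + dx) = "O" ∨ pvGet2 m (y + dy) (x + dx) = "T"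
          · have : (pvGet2 m (y + dy) (x + dx) = "O") ∨ (pvGet2 m (y + dy) (x + dx) = "T") := hOT
            simp only [pvSeeDir, pvCollect, hcond, if_true, pvCheck, hsame]
            rcases this with h | h <;> simp [h]
          · push Not at hOT
            by_cases hXv : pvGet2 m (y + dy) (x + dx) = "X"
            · simp only [pvSeeDir, pvCollect, hcond, if_true, pvCheck, hsame, hXv]
              norm_num
              rw [ih (y + dy) (x + dx) hnn.1 hnn.2]
              cases hcol : pvCollect m N dy dx (y + dy) (x + dx) f with
              | none => simp
              | some cells => simp [hin]
            · simp only [pvSeeDir, pvCollect, hcond, if_true, pvCheck, hsame]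
              simp [hS, hOT.1, hOT.2, hXv]
              simpa using ih (y + dy) (x + dx) hnn.1 hnn.2
    · simp [pvSeeDir, pvCollect, hcond]

-- the grid scan of A equals the two comprehension filters of B
theorem pvScan_step (m : List (List String)) (cs : List (Int × Int)) (t0 b0 : List (Int × Int)) :
    cs.foldl (fun tb c =>
        if pvGet2 m c.1 c.2 = "T" then (tb.1 ++ [(c.1, c.2)], tb.2)
        else if pvGet2 m c.1 c.2 = "X" then (tb.1, tb.2 ++ [(c.1, c.2)]) else tb) (t0, b0) =
      (t0 ++ cs.filter (fun c => pvGet2 m c.1 c.2 = "T"),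
       b0 ++ cs.filter (fun c => pvGet2 m c.1 c.2 = "X")) := by
  induction cs generalizing t0 b0 with
  | nil => simp
  | cons c cs ih =>
    by_cases hT : pvGet2 m c.1 c.2 = "T"
    · simp [hT, ih]
    · by_cases hX : pvGet2 m c.1 c.2 = "X"
      · simp [hX, ih]
      · simp [hT, hX, ih]

theorem pvScan_eq (m : List (List String)) (N : Int) :
    pvScan m N = ((pvCells N).filter (fun c => pvGet2 m c.1 c.2 = "T"),
                  (pvCells N).filter (fun c => pvGet2 m c.1 c.2 = "X")) := by
  have h1 : pvScan m N = (pvCells N).foldl (fun tb (c : Int × Int) =>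
      if pvGet2 m c.1 c.2 = "T" then (tb.1 ++ [(c.1, c.2)], tb.2)
      else if pvGet2 m c.1 c.2 = "X" then (tb.1, tb.2 ++ [(c.1, c.2)]) else tb) ([], []) := by
    unfold pvScan pvCells
    rw [List.foldl_flatMap]
    refine PySem.List.foldl_congr_mem _ _ _ _ (fun acc i _ => ?_)
    rw [List.foldl_map]
  rw [h1, pvScan_step]
  simp

theorem pvCells_mem (N : Int) (c : Int × Int) :
    c ∈ pvCells N ↔ 0 ≤ c.1 ∧ c.1 < N ∧ 0 ≤ c.2 ∧ c.2 < N := by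
  obtain ⟨a, b⟩ := c
  constructor
  · intro h
    simp only [pvCells, List.mem_flatMap, List.mem_map] at h
    obtain ⟨i, hi, j, hj, hc⟩ := h
    rw [PySem.List.mem_pyRange_one] at hi hj
    injection hc with h1 h2
    subst h1; subst h2
    exact ⟨hi.1, hi.2, hj.1, hj.2⟩
  · rintro ⟨h1, h2, h3, h4⟩
    simp only [pvCells, List.mem_flatMap, List.mem_map]
    exact ⟨a, (PySem.List.mem_pyRange_one).mpr ⟨h1, h2⟩, b,
      (PySem.List.mem_pyRange_one).mpr ⟨h3, h4⟩, rfl⟩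

theorem pvCells_nodup (N : Int) : (pvCells N).Nodup := by
  unfold pvCells
  rw [List.nodup_flatMap]
  refine ⟨fun i _ => (PySem.List.nodup_pyRange_one 0 N).map (fun a b h => by simpa using h), ?_⟩
  refine (PySem.List.nodup_pyRange_one 0 N).imp ?_
  intro a b hab x hx hy
  simp only [List.mem_map] at hx hy
  obtain ⟨j, _, rfl⟩ := hx
  obtain ⟨j', _, h⟩ := hy
  injection h with h1 h2
  exact hab h1.symm

-- members of pvCombs k l are duplicate-free sublists of l
theorem pvCombs_sublist {α : Type} (k : Nat) (l p : List α) (h : p ∈ pvCombs k l) :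
    p.Sublist l := by
  induction l generalizing k p with
  | nil =>
    cases k with
    | zero => simp [pvCombs] at h; simp [h]
    | succ k => simp [pvCombs] at h
  | cons a l ih =>
    cases k with
    | zero => simp [pvCombs] at h; simp [h]
    | succ k =>
      simp only [pvCombs, List.mem_append, List.mem_map] at h
      rcases h with ⟨q, hq, rfl⟩ | h
      · exact (ih k q hq).cons₂ a
      · exact (ih (k + 1) p h).cons a

-- per pick: some teacher sees a student on the obstructed map iff some threatened
-- segment is missed by the pick
theorem pvPick_eq (m : List (List String)) (N : Int) (teachers pick : List (Int × Int))
    (hnd : pick.Nodup) (hp : ∀ c ∈ pick, pvOk m c)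
    (hT : ∀ t ∈ teachers, 0 ≤ t.1 ∧ 0 ≤ t.2) :
    teachers.any (pvTeacherSee (pvPlace m pick "O") N) =
      (pvSegs m N teachers).any (fun s => s.all (fun c => !pick.contains c)) := by
  unfold pvSegs
  rw [List.any_flatMap]
  refine PySem.List.any_congr_mem (fun t ht => ?_)
  have h1 := pvWalk m N pick hnd hp 0 1 (by simp) N.toNat t.1 t.2 (hT t ht).1 (hT t ht).2
  have h2 := pvWalk m N pick hnd hp 0 (-1) (by simp) N.toNat t.1 t.2 (hT t ht).1 (hT t ht).2
  have h3 := pvWalk m N pick hnd hp 1 0 (by simp) N.toNat t.1 t.2 (hT t ht).1 (hT t ht).2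
  have h4 := pvWalk m N pick hnd hp (-1) 0 (by simp) N.toNat t.1 t.2 (hT t ht).1 (hT t ht).2
  unfold pvTeacherSee
  rw [h1, h2, h3, h4, List.any_filterMap]
  simp only [List.any_cons, List.any_nil]
  cases pvCollect m N 0 1 t.1 t.2 N.toNat <;>
    cases pvCollect m N 0 (-1) t.1 t.2 N.toNat <;>
    cases pvCollect m N 1 0 t.1 t.2 N.toNat <;>
    cases pvCollect m N (-1) 0 t.1 t.2 N.toNat <;>
    simp

-- A's main loop returns YES exactly when some combination blinds every teacher
theorem pvLoop_eq (N : Int) (teachers : List (Int × Int)) (m : List (List String))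
    (picks : List (List (Int × Int)))
    (hp : ∀ pick ∈ picks, pick.Nodup ∧ ∀ c ∈ pick, pvOk m c) :
    pvLoop N teachers picks m =
      if picks.any (fun pick => !(teachers.any (pvTeacherSee (pvPlace m pick "O") N)))
      then "YES" else "NO" := by
  induction picks with
  | nil => simp [pvLoop]
  | cons pick rest ih =>
    have h0 := hp pick (by simp)
    by_cases hsee : teachers.any (pvTeacherSee (pvPlace m pick "O") N)
    · simp only [pvLoop]
      rw [if_pos hsee, pvPlace_restore pick m h0.1 h0.2,
        ih (fun q hq => hp q (by simp [hq])), List.any_cons, hsee]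
      rw [Bool.not_true, Bool.false_or]
    · simp only [pvLoop]
      rw [if_neg hsee, List.any_cons]
      simp only [Bool.not_eq_true] at hsee
      rw [hsee]
      simp

-- blanks found by the scan are usable obstacle cells
theorem pvBlanks_ok (inputMap : List (List String)) (N : Int) (hpre : Pre_solution inputMap N)
    (c : Int × Int) (hc : c ∈ (pvCells N).filter (fun c => pvGet2 inputMap c.1 c.2 = "X")) :
    pvOk inputMap c := by
  obtain ⟨hcell, hXd⟩ := List.mem_filter.mp hc
  obtain ⟨h1, h2, h3, h4⟩ := (pvCells_mem N c).mp hcell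
  have hX : pvGet2 inputMap c.1 c.2 = "X" := by simpa using hXd
  have hlen : (N : Int) ≤ inputMap.length := hpre.1
  have hr : c.1.toNat < inputMap.length := by omega
  have h5 : c.1.toNat < (inputMap.take N.toNat).length := by
    simp [List.length_take]; omega
  have hmemtake : inputMap[c.1.toNat]'hr ∈ inputMap.take N.toNat := by
    have := List.getElem_mem h5
    rwa [List.getElem_take] at this
  have h6 : (N : Int) ≤ (inputMap[c.1.toNat]'hr).length := hpre.2 _ hmemtake
  refine ⟨h1, h3, hr, ?_, hX⟩
  rw [List.getD_eq_getElem _ _ hr]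
  omega

-- ===== VERDICT (by name: the statement is the Claim_ definition above) =====
theorem solution_spec : Claim_equal_solution := by
  intro inputMap N hdom hpre
  unfold Spec_solution solution solution_alt
  rw [pvScan_eq]
  have hpick : ∀ pick ∈ pvCombs 3 ((pvCells N).filter (fun c => pvGet2 inputMap c.1 c.2 = "X")),
      pick.Nodup ∧ ∀ c ∈ pick, pvOk inputMap c := by
    intro pick hp2
    have hsub := pvCombs_sublist 3 _ pick hp2
    exact ⟨hsub.nodup ((pvCells_nodup N).filter _),
      fun c hc => pvBlanks_ok inputMap N hpre c (hsub.subset hc)⟩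
  have hT : ∀ t ∈ (pvCells N).filter (fun c => pvGet2 inputMap c.1 c.2 = "T"),
      0 ≤ t.1 ∧ 0 ≤ t.2 := by
    intro t ht
    obtain ⟨h1, h2, h3, h4⟩ := (pvCells_mem N t).mp (List.mem_filter.mp ht).1
    exact ⟨h1, h3⟩
  rw [pvLoop_eq N _ inputMap _ hpick]
  have hcond : ∀ pick ∈ pvCombs 3 ((pvCells N).filter (fun c => pvGet2 inputMap c.1 c.2 = "X")),
      (!((((pvCells N).filter (fun c => pvGet2 inputMap c.1 c.2 = "T")).any
          (pvTeacherSee (pvPlace inputMap pick "O") N)))) =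
      ((pvSegs inputMap N ((pvCells N).filter (fun c => pvGet2 inputMap c.1 c.2 = "T"))).all
        (fun s => s.any (fun c => pick.contains c))) := by
    intro pick hp2
    rw [pvPick_eq inputMap N _ pick (hpick pick hp2).1 (hpick pick hp2).2 hT]
    simp only [List.all_eq_not_any_not, Bool.not_not]
  rw [PySem.List.any_congr_mem hcond]
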